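-- pv_equiv track=rewrite | github.com/jma96x/AdventCode2023 | Day7/main.py | best_char
-- ===== SOURCE A (Python) =====
-- def best_char(game):
--     frec = {}
--
--     for c in game:
--         if c != "J":
--             if c in frec:
--                 frec[c] += 1
--             else:
--                 frec[c] = 1
--
--     if frec:
--         b_char = max(frec, key=frec.get)
--         return b_char
--     else:
--         return "J"
-- ===== SOURCE B (Python) =====
-- def best_char(game):
--     best_c = "J"
--     best_n = 0
--     seen = set()
--     for c in game:
--         if c != "J" and c not in seen:
--             seen.add(c)
--             n = game.count(c)
--             if n > best_n:
--                 best_c = c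
--                 best_n = n
--     return best_c
-- ===== Notes on version B (the rewrite author's own statement) =====
-- stated objective: alternative
-- what changed: Replaced the frequency dict plus max(frec, key=frec.get) by a single ordered scan that counts each first-seen non-J character with game.count and keeps the strict running maximum, which reproduces A's first-occurrence tie-breaking.
import Mathlib
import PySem

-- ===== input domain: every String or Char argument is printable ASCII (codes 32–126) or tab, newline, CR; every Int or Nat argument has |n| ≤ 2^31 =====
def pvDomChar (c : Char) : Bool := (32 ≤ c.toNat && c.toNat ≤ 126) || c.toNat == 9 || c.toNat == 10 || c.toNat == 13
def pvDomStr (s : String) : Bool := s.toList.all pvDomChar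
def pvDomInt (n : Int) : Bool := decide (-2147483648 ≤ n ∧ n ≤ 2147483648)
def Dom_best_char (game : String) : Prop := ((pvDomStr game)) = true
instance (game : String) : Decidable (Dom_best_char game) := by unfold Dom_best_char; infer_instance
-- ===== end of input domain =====

-- B replaces the frequency dict + max(frec, key=frec.get) by one ordered scan with game.count
-- on first occurrences and a strict running maximum (objective: alternative, same result).

-- ===== PORT A =====
def best_char (game : String) : String :=
  let frec : PySem.Dict Char Int :=
    game.toList.foldl (fun frec c =>
      if c ≠ 'J' then
        if frec.contains c then frec.modify c 0 (· + 1)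
        else frec.insert c 1
      else frec) PySem.Dict.empty
  if frec.size ≠ 0 then
    match PySem.List.max? frec.keys (fun k => frec.getD k 0) with
    | some b_char => String.ofList [b_char]
    | none => "J"   -- unreachable: frec is nonempty here
  else "J"

-- ===== PORT B =====
def best_char_alt (game : String) : String :=
  (game.toList.foldl (fun st c =>
      if c ≠ 'J' ∧ ¬ (PySem.Set.contains st.2.2 c = true) then
        let n : Int := (PySem.Str.count game (String.ofList [c]) : Int)
        if n > st.2.1 then (String.ofList [c], n, PySem.Set.add st.2.2 c)
        else (st.1, st.2.1, PySem.Set.add st.2.2 c)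
      else st) ("J", (0 : Int), PySem.Set.empty)).1

-- ===== PRECONDITION & SPEC =====
def Spec_best_char (game : String) (out : String) : Prop := out = best_char_alt game
instance (game : String) (out : String) : Decidable (Spec_best_char game out) := by unfold Spec_best_char; infer_instance

-- ===== CLAIM (what is proved, stated in full; the proofs are below) =====
def Claim_equal_best_char : Prop := ∀ (game : String), Dom_best_char game → Spec_best_char game (best_char game)

-- ===== LEMMAS AND PROOFS =====

-- the list of new non-'J' characters of xs, in first-occurrence order, relative to seen-set s
def bNew (s : PySem.Set Char) : List Char → List Char
  | [] => []
  | c :: t => if c ≠ 'J' ∧ ¬ (PySem.Set.contains s c = true) then c :: bNew (PySem.Set.add s c) t else bNew s t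

theorem bNew_ne_J (xs : List Char) : ∀ (s : PySem.Set Char) (k : Char), k ∈ bNew s xs → k ≠ 'J' := by
  induction xs with
  | nil => intro s k h; simp [bNew] at h
  | cons c t ih =>
    intro s k h
    by_cases hc : c ≠ 'J' ∧ ¬ (PySem.Set.contains s c = true)
    · rw [bNew, if_pos hc] at h
      rcases List.mem_cons.mp h with h | h
      · subst h; exact hc.1
      · exact ih _ _ h
    · rw [bNew, if_neg hc] at h; exact ih _ _ h

theorem update_eq_append_bNew (xs : List Char) : ∀ (s : PySem.Set Char),
    PySem.Set.update s (xs.filter (fun c => decide (c ≠ 'J'))) = s ++ bNew s xs := by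
  induction xs with
  | nil => intro s; simp [bNew, PySem.Set.update]
  | cons c t ih =>
    intro s
    by_cases hJ : c ≠ 'J'
    · rw [List.filter_cons_of_pos (by simpa using hJ)]
      by_cases hs : PySem.Set.contains s c = true
      · have hmem : c ∈ s := by simpa using hs
        have hadd : PySem.Set.add s c = s := by simp [PySem.Set.add, hmem]
        rw [bNew, if_neg (by simp [hmem])]
        calc PySem.Set.update s (c :: t.filter (fun c => decide (c ≠ 'J')))
            = PySem.Set.update (PySem.Set.add s c) (t.filter (fun c => decide (c ≠ 'J'))) := by
              simp [PySem.Set.update]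
          _ = s ++ bNew s t := by rw [hadd]; exact ih s
      · have hmem : c ∉ s := by simpa using hs
        have hadd : PySem.Set.add s c = s ++ [c] := by simp [PySem.Set.add, hmem]
        rw [bNew, if_pos ⟨hJ, by simp [hmem]⟩]
        calc PySem.Set.update s (c :: t.filter (fun c => decide (c ≠ 'J')))
            = PySem.Set.update (PySem.Set.add s c) (t.filter (fun c => decide (c ≠ 'J'))) := by
              simp [PySem.Set.update]
          _ = (s ++ [c]) ++ bNew (PySem.Set.add s c) t := by rw [hadd] at *; exact ih _
          _ = s ++ (c :: bNew (PySem.Set.add s c) t) := by simp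
    · rw [not_not] at hJ
      rw [List.filter_cons_of_neg (by simp [hJ]), bNew, if_neg (by simp [hJ])]
      exact ih s

-- B's seen-skipping loop over xs is the plain strict-max loop over bNew s xs
theorem foldB_eq (game : String) (xs : List Char) : ∀ (bc : String) (bn : Int) (s : PySem.Set Char),
    xs.foldl (fun st c =>
      if c ≠ 'J' ∧ ¬ (PySem.Set.contains st.2.2 c = true) then
        if ((PySem.Str.count game (String.ofList [c]) : Int)) > st.2.1 then
          (String.ofList [c], ((PySem.Str.count game (String.ofList [c]) : Int)), PySem.Set.add st.2.2 c)
        else (st.1, st.2.1, PySem.Set.add st.2.2 c)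
      else st) (bc, bn, s)
    = (((bNew s xs).foldl (fun a k =>
          if ((PySem.Str.count game (String.ofList [k]) : Int)) > a.2 then
            (String.ofList [k], ((PySem.Str.count game (String.ofList [k]) : Int)))
          else a) (bc, bn)).1,
       ((bNew s xs).foldl (fun a k =>
          if ((PySem.Str.count game (String.ofList [k]) : Int)) > a.2 then
            (String.ofList [k], ((PySem.Str.count game (String.ofList [k]) : Int)))
          else a) (bc, bn)).2,
       PySem.Set.update s (bNew s xs)) := by
  induction xs with
  | nil => intro bc bn s; simp [bNew, PySem.Set.update]
  | cons c t ih =>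
    intro bc bn s
    by_cases hc : c ≠ 'J' ∧ ¬ (PySem.Set.contains s c = true)
    · rw [bNew, if_pos hc]
      rw [List.foldl_cons, if_pos hc]
      by_cases hn : ((PySem.Str.count game (String.ofList [c]) : Int)) > bn
      · rw [if_pos hn]
        rw [ih (String.ofList [c]) _ (PySem.Set.add s c)]
        simp only [List.foldl_cons]
        rw [if_pos hn]
        simp [PySem.Set.update]
      · rw [if_neg hn]
        rw [ih bc bn (PySem.Set.add s c)]
        simp only [List.foldl_cons]
        rw [if_neg hn]
        simp [PySem.Set.update]
    · rw [bNew, if_neg hc]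
      rw [List.foldl_cons, if_neg hc]
      exact ih bc bn s

-- PySem.Chars.count with a single-character needle is List.count (fuel unfolding)
theorem go_single (c : Char) : ∀ (fuel : Nat) (s : List Char) (acc : Nat), s.length ≤ fuel →
    PySem.Chars.count.go [c] fuel s acc = acc + s.count c := by
  intro fuel
  induction fuel with
  | zero => intro s acc h; cases s with
    | nil => simp [PySem.Chars.count.go]
    | cons a t => simp at h
  | succ n ih => intro s acc h; cases s with
    | nil => simp [PySem.Chars.count.go]
    | cons a t =>
      simp only [PySem.Chars.count.go]
      by_cases hc : c = a
      · subst hc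
        simp [List.isPrefixOf, ih t (acc+1) (by simpa using h)]
        omega
      · have hp : ([c].isPrefixOf (a :: t)) = false := by
          simpa [List.isPrefixOf] using fun h' => hc (eq_of_beq h')
        rw [hp]
        rw [if_neg (by simp)]
        rw [ih t acc (by simpa using h), List.count_cons]
        simp [Ne.symm hc]

theorem count_single (s : List Char) (c : Char) : PySem.Chars.count s [c] = s.count c := by
  simp [PySem.Chars.count, go_single c s.length s 0 le_rfl]

theorem str_count_single (game : String) (c : Char) :
    PySem.Str.count game (String.ofList [c]) = game.toList.count c := by
  have h : (String.ofList [c]).toList = [c] := Eq.symm ((fun {l} {s} => String.ofList_eq.mp) rfl)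
  simp [PySem.Str.count, h, count_single]

-- the running strict-max loops of A (over Option) and B (over String × Int) track each other
theorem run_eq (game : String) (ys : List Char) : ∀ (L : List Char),
    (∀ k ∈ L, ((PySem.Dict.counter ys).getD k 0) = ((PySem.Str.count game (String.ofList [k]) : Int))) →
    ∀ (m m' : Char),
    L.foldl (fun acc x => Option.casesOn acc (some x)
      (fun mm => if (PySem.Dict.counter ys).getD mm 0 < (PySem.Dict.counter ys).getD x 0 then some x else some mm)) (some m) = some m' →
    L.foldl (fun a k =>
        if ((PySem.Str.count game (String.ofList [k]) : Int)) > a.2 then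
          (String.ofList [k], ((PySem.Str.count game (String.ofList [k]) : Int)))
        else a) (String.ofList [m], (PySem.Dict.counter ys).getD m 0)
      = (String.ofList [m'], (PySem.Dict.counter ys).getD m' 0) := by
  intro L
  induction L with
  | nil => intro _ m m' h; simp at h; subst h; rfl
  | cons k t ih =>
    intro hKP m m' h
    rw [List.foldl_cons] at h
    rw [List.foldl_cons]
    replace h : t.foldl (fun acc x => Option.casesOn acc (some x)
      (fun mm => if (PySem.Dict.counter ys).getD mm 0 < (PySem.Dict.counter ys).getD x 0 then some x else some mm))
        (if (PySem.Dict.counter ys).getD m 0 < (PySem.Dict.counter ys).getD k 0 then some k else some m) = some m' := h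
    have hk : (PySem.Dict.counter ys).getD k 0 = ((PySem.Str.count game (String.ofList [k]) : Int)) := hKP k (by simp)
    have ht : ∀ x ∈ t, (PySem.Dict.counter ys).getD x 0 = ((PySem.Str.count game (String.ofList [x]) : Int)) :=
      fun x hx => hKP x (by simp [hx])
    by_cases hlt : (PySem.Dict.counter ys).getD m 0 < (PySem.Dict.counter ys).getD k 0
    · rw [if_pos hlt] at h
      rw [if_pos (by rw [← hk]; exact hlt)]
      rw [← hk]
      exact ih ht k m' h
    · rw [if_neg hlt] at h
      rw [if_neg (by rw [← hk]; exact hlt)]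
      exact ih ht m m' h

theorem max?_cons (ys : List Char) (m0 : Char) (t : List Char) :
    PySem.List.max? (m0 :: t) (fun k => (PySem.Dict.counter ys).getD k 0)
      = t.foldl (fun acc x => Option.casesOn acc (some x)
          (fun mm => if (PySem.Dict.counter ys).getD mm 0 < (PySem.Dict.counter ys).getD x 0 then some x else some mm)) (some m0) := by
  simp only [PySem.List.max?]
  rw [List.foldl_cons]
  apply PySem.List.foldl_congr_mem
  intro acc x _
  cases acc <;> rfl

theorem foldl_max_some (ys : List Char) : ∀ (t : List Char) (m : Char),
    ∃ m', t.foldl (fun acc x => Option.casesOn acc (some x)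
      (fun mm => if (PySem.Dict.counter ys).getD mm 0 < (PySem.Dict.counter ys).getD x 0 then some x else some mm)) (some m) = some m' := by
  intro t
  induction t with
  | nil => intro m; exact ⟨m, rfl⟩
  | cons k t ih =>
    intro m
    rw [List.foldl_cons]
    show ∃ m', t.foldl _ (if (PySem.Dict.counter ys).getD m 0 < (PySem.Dict.counter ys).getD k 0 then some k else some m) = some m'
    by_cases h : (PySem.Dict.counter ys).getD m 0 < (PySem.Dict.counter ys).getD k 0
    · rw [if_pos h]; exact ih k
    · rw [if_neg h]; exact ih m

-- A's dict loop builds Counter(filter(≠'J', game))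
theorem frec_eq_counter (game : String) :
    game.toList.foldl (fun frec c =>
      if c ≠ 'J' then
        if frec.contains c then frec.modify c 0 (· + 1)
        else frec.insert c 1
      else frec) (PySem.Dict.empty : PySem.Dict Char Int)
    = PySem.Dict.counter (game.toList.filter (fun c => decide (c ≠ 'J'))) := by
  have h1 : game.toList.foldl (fun frec c =>
      if c ≠ 'J' then
        if frec.contains c then frec.modify c 0 (· + 1)
        else frec.insert c 1
      else frec) (PySem.Dict.empty : PySem.Dict Char Int)
    = game.toList.foldl (fun frec c =>
      if c ≠ 'J' then frec.modify c 0 (· + 1) else frec) (PySem.Dict.empty : PySem.Dict Char Int) := by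
    apply PySem.List.foldl_congr_mem
    intro d c _
    by_cases hJ : c ≠ 'J'
    · rw [if_pos hJ, if_pos hJ]
      by_cases hd : d.contains c
      · rw [if_pos hd]
      · rw [if_neg hd]
        have hcf : d.contains c = false := by simpa using hd
        simp [PySem.Dict.modify, PySem.Dict.getD_of_not_contains, hcf]
    · rw [if_neg hJ, if_neg hJ]
  rw [PySem.Dict.counter_eq_foldl, ← PySem.List.foldl_ite_eq_foldl_filter]
  exact h1

theorem best_char_eq (game : String) : best_char game = best_char_alt game := by
  unfold best_char best_char_alt
  rw [frec_eq_counter]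
  set xs := game.toList with hxs
  set ys := xs.filter (fun c => decide (c ≠ 'J')) with hys
  set L := PySem.Set.ofList ys with hL
  -- B's loop in terms of bNew
  have hBnew : bNew PySem.Set.empty xs = L := by
    have h := update_eq_append_bNew xs PySem.Set.empty
    simp only [PySem.Set.empty, List.nil_append] at h
    rw [hL, PySem.Set.ofList_eq_foldl, hys]
    show bNew [] xs = PySem.Set.update [] (List.filter (fun c => decide (c ≠ 'J')) xs)
    rw [h]
  have hB := foldB_eq game xs "J" 0 PySem.Set.empty
  simp only []
  rw [hB, hBnew]
  -- A's max over the counter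
  have hkeys : (PySem.Dict.counter ys).keys = L := PySem.Dict.keys_counter ys
  have hsize : (PySem.Dict.counter ys).size = L.length := by
    have : (PySem.Dict.counter ys).items = L.map (fun k => (k, (ys.count k : Int))) :=
      PySem.Dict.items_counter ys
    simp [PySem.Dict.size, this]
  have hgetD : ∀ k, (PySem.Dict.counter ys).getD k 0 = (ys.count k : Int) :=
    fun k => PySem.Dict.getD_counter ys k
  by_cases hnil : L = []
  · simp [hsize, hnil]
  · rw [if_pos (by simp [hsize, List.length_eq_zero_iff]; exact hnil)]
    obtain ⟨m0, t, hcons⟩ := List.exists_cons_of_ne_nil hnil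
    have hKP : ∀ k ∈ L, ((PySem.Dict.counter ys).getD k 0)
        = ((PySem.Str.count game (String.ofList [k]) : Int)) := by
      intro k hk
      have hkJ : k ≠ 'J' := bNew_ne_J xs PySem.Set.empty k (by rw [hBnew]; exact hk)
      rw [hgetD k, str_count_single]
      have : ys.count k = xs.count k := List.count_filter (by simpa using hkJ)
      rw [this]
    -- unfold the max? fold to a fold from some m0
    rw [hkeys, hcons, max?_cons ys m0 t]
    obtain ⟨m', hm'⟩ := foldl_max_some ys t m0
    rw [hm']
    -- positivity of the first count
    have hm0L : m0 ∈ L := by rw [hcons]; simp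
    have hm0pos : ((PySem.Str.count game (String.ofList [m0]) : Int)) > (0 : Int) := by
      have hmem : m0 ∈ ys := by
        have := PySem.Set.mem_ofList ys m0
        rw [← hL] at this
        exact this.mp hm0L
      have h1 : 1 ≤ ys.count m0 := List.one_le_count_iff.mpr hmem
      have hkJ : m0 ≠ 'J' := bNew_ne_J xs PySem.Set.empty m0 (by rw [hBnew]; exact hm0L)
      rw [str_count_single, ← hxs]
      have : ys.count m0 = xs.count m0 := List.count_filter (by simpa using hkJ)
      omega
    -- run B's fold: first step picks m0, then run_eq
    rw [List.foldl_cons]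
    rw [if_pos hm0pos]
    have hRun := run_eq game ys t
      (fun x hx => hKP x (by rw [hcons]; simp [hx])) m0 m' hm'
    rw [hKP m0 hm0L] at hRun
    simp only [hRun]

-- ===== VERDICT (by name: the statement is the Claim_ definition above) =====
theorem best_char_spec : Claim_equal_best_char := by
  intro game _
  unfold Spec_best_char
  exact best_char_eq game
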